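-- pv_equiv track=rewrite | github.com/vikvik98/Algoritmos_2017.1 | Atividade G/fabio_06_01.py | substituir_consoante
-- ===== SOURCE A (Python) =====
-- def substituir_consoante(frase):
--     nova_frase = ''
--     for letra in frase:
--         if eh_vogal(letra):
--            nova_frase += letra
--         else:
--            nova_frase += '#'
--     return nova_frase
--
-- def eh_vogal(letra):
--     vogais = 'AEIOUaeiou '
--     return letra in vogais
-- ===== SOURCE B (Python) =====
-- import re
--
-- def substituir_consoante(frase):
--     return re.sub(r'[^AEIOUaeiou ]', '#', frase)
-- ===== Notes on version B (the rewrite author's own statement) =====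
-- stated objective: idiomatic
-- what changed: Replaces A's explicit loop with quadratic string accumulation by a single re.sub call with the negated vowel class (space included), letting the regex engine do the substitution in one scan.
import Mathlib
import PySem

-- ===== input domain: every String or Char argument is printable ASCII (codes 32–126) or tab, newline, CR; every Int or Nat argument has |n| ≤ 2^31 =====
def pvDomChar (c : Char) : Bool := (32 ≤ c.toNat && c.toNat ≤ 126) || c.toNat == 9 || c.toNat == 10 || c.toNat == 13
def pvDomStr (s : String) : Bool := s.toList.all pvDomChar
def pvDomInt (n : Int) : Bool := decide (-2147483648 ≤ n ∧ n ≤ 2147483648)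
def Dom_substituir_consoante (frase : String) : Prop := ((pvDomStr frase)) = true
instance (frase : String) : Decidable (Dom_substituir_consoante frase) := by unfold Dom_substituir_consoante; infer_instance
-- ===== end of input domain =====

-- B replaces A's explicit loop accumulating a string by a single regex char-class
-- substitution (re.sub on the negated vowel class, space included): idiomatic one-call form.


-- ===== PORT A =====
-- helper eh_vogal: 'letra in vogais' = substring membership; for a single char this is list membership
def eh_vogal (letra : Char) : Bool := "AEIOUaeiou ".toList.contains letra

-- A: loop over the characters, appending letra or '#' to the accumulator string
def substituir_consoante (frase : String) : String :=
  frase.toList.foldl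
    (fun nova_frase letra =>
      if eh_vogal letra then nova_frase ++ String.singleton letra
      else nova_frase ++ "#") ""

-- ===== PORT B =====
-- re.sub with a single-character negated class substitutes per character in one scan;
-- ported exactly as that per-character substitution over the string's characters.
def substituir_consoante_alt (frase : String) : String :=
  String.ofList (frase.toList.map (fun c => if "AEIOUaeiou ".toList.contains c then c else '#'))

-- ===== PRECONDITION & SPEC =====
def Spec_substituir_consoante (frase : String) (out : String) : Prop := out = substituir_consoante_alt frase
instance (frase : String) (out : String) : Decidable (Spec_substituir_consoante frase out) := by unfold Spec_substituir_consoante; infer_instance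

-- ===== CLAIM (what is proved, stated in full; the proofs are below) =====
def Claim_equal_substituir_consoante : Prop := ∀ (frase : String), Dom_substituir_consoante frase → Spec_substituir_consoante frase (substituir_consoante frase)

-- ===== LEMMAS AND PROOFS =====
theorem substituir_foldl_eq_map (l : List Char) (acc : String) :
    l.foldl (fun nova_frase letra =>
      if eh_vogal letra then nova_frase ++ String.singleton letra
      else nova_frase ++ "#") acc
      = acc ++ String.ofList (l.map (fun c => if "AEIOUaeiou ".toList.contains c then c else '#')) := by
  induction l generalizing acc with
  | nil => simp
  | cons c l ih =>
    simp only [List.foldl, List.map]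
    rw [ih]
    by_cases h : eh_vogal c = true
    · have hc : "AEIOUaeiou ".toList.contains c = true := h
      rw [if_pos h, if_pos hc]
      apply String.ext
      simp [String.singleton, String.toList_ofList]
    · have hc : ¬ "AEIOUaeiou ".toList.contains c = true := h
      rw [if_neg h, if_neg hc]
      apply String.ext
      simp [String.toList_ofList]

-- ===== VERDICT (by name: the statement is the Claim_ definition above) =====
theorem substituir_consoante_spec : Claim_equal_substituir_consoante := by
  intro frase _
  unfold Spec_substituir_consoante substituir_consoante substituir_consoante_alt
  simpa using substituir_foldl_eq_map frase.toList ""
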